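-- pv_equiv track=rewrite | github.com/mendes-jv/minishell | tests/1.test_tokens_lexer.py | get_lenght_without_end_spaces_or_tabs
-- ===== SOURCE A (Python) =====
-- def	get_lenght_without_end_spaces_or_tabs(bash):
-- 	i = 0
-- 	lenght = len(bash)
-- 	while (i < lenght):
-- 		if bash[lenght - 1] == " " or bash[lenght - 1] == "\t":
-- 			lenght -= 1
-- 		else:
-- 			break
-- 	return lenght
-- ===== SOURCE B (Python) =====
-- def get_lenght_without_end_spaces_or_tabs(bash):
--     end = 0
--     for i, c in enumerate(bash):
--         if c != " " and c != "\t":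
--             end = i + 1
--     return end
-- ===== Notes on version B (the rewrite author's own statement) =====
-- stated objective: alternative
-- what changed: Replaces A's backward scan that shrinks a length counter from the end with a single forward pass that records the end position (i+1) of the last character that is not space or tab.
import Mathlib
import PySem

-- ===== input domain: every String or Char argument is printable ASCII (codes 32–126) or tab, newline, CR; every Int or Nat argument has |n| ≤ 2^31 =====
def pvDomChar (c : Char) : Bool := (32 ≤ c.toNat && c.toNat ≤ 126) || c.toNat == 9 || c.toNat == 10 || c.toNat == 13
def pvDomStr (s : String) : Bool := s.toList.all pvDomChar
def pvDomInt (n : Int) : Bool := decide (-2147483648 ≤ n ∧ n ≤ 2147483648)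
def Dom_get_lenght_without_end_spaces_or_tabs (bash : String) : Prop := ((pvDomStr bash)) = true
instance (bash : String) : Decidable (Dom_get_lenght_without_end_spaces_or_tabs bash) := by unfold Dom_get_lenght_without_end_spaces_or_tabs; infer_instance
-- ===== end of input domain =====

-- B replaces A's backward end-shrinking scan by a single forward pass recording the end of the last non-space/tab char — alternative, same cost.


-- ===== PORT A =====
-- A's while loop: i stays 0, so it runs while 0 < lenght, shrinking lenght while
-- bash[lenght-1] is ' ' or '\t'; structural recursion on lenght.
def pvLoopA (s : List Char) : Nat → Nat
  | 0 => 0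
  | n + 1 =>
    if PySem.List.pyGet? s (n : Int) = some ' ' ∨ PySem.List.pyGet? s (n : Int) = some '\t' then
      pvLoopA s n
    else
      n + 1

def get_lenght_without_end_spaces_or_tabs (bash : String) : Int :=
  ((pvLoopA bash.toList bash.toList.length : Nat) : Int)

-- ===== PORT B =====
-- Source B's forward pass: for i, c in enumerate(bash): if c not space/tab, end = i + 1.
def get_lenght_without_end_spaces_or_tabs_alt (bash : String) : Int :=
  (PySem.List.enumerate bash.toList).foldl
    (fun jend ic => if ic.2 ≠ ' ' ∧ ic.2 ≠ '\t' then ic.1 + 1 else jend) 0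

-- ===== PRECONDITION & SPEC =====
def Spec_get_lenght_without_end_spaces_or_tabs (bash : String) (out : Int) : Prop := out = get_lenght_without_end_spaces_or_tabs_alt bash
instance (bash : String) (out : Int) : Decidable (Spec_get_lenght_without_end_spaces_or_tabs bash out) := by unfold Spec_get_lenght_without_end_spaces_or_tabs; infer_instance

-- ===== CLAIM (what is proved, stated in full; the proofs are below) =====
def Claim_equal_get_lenght_without_end_spaces_or_tabs : Prop := ∀ (bash : String), Dom_get_lenght_without_end_spaces_or_tabs bash → Spec_get_lenght_without_end_spaces_or_tabs bash (get_lenght_without_end_spaces_or_tabs bash)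

-- ===== LEMMAS AND PROOFS =====

-- Both sides equal the length of the input with its trailing run of ' '/'\t' removed.
theorem pvLoopA_eq (s : List Char) (n : Nat) (hn : n ≤ s.length) :
    pvLoopA s n = ((s.take n).reverse.dropWhile (fun c => c == ' ' || c == '\t')).length := by
  induction n with
  | zero => simp [pvLoopA]
  | succ m ih =>
    have hm : m < s.length := hn
    have hget : PySem.List.pyGet? s (m : Int) = some s[m] := by
      simp [PySem.List.pyGet?, PySem.List.pyIdx?, hm, Int.toNat_natCast]
    have htake : (s.take (m + 1)).reverse = s[m] :: (s.take m).reverse := by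
      rw [List.take_add_one, List.getElem?_eq_getElem hm]
      simp
    rw [pvLoopA, htake, List.dropWhile_cons]
    by_cases hc : s[m] = ' ' ∨ s[m] = '\t'
    · have hcond : PySem.List.pyGet? s (m : Int) = some ' ' ∨ PySem.List.pyGet? s (m : Int) = some '\t' := by
        rcases hc with h | h <;> simp [hget, h]
      have hb : (s[m] == ' ' || s[m] == '\t') = true := by
        rcases hc with h | h <;> simp [h]
      rw [if_pos hcond, hb]
      simp only [ih (Nat.le_of_lt hm), if_true]
    · have h1 : ¬ s[m] = ' ' := fun h => hc (Or.inl h)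
      have h2 : ¬ s[m] = '\t' := fun h => hc (Or.inr h)
      have hb : (s[m] == ' ' || s[m] == '\t') = false := by simp [h1, h2]
      have hcond : ¬ (PySem.List.pyGet? s (m : Int) = some ' ' ∨ PySem.List.pyGet? s (m : Int) = some '\t') := by
        simp [hget, h1, h2]
      rw [if_neg hcond, hb]
      simp [List.length_take]
      omega

theorem pvFoldB_eq (s : List Char) :
    (PySem.List.enumerate s).foldl
      (fun jend ic => if ic.2 ≠ ' ' ∧ ic.2 ≠ '\t' then ic.1 + 1 else jend) 0
    = ((s.reverse.dropWhile (fun c => c == ' ' || c == '\t')).length : Int) := by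
  induction s using List.reverseRecOn with
  | nil => simp [PySem.List.enumerate]
  | append_singleton xs c ih =>
    rw [PySem.List.enumerate_append, List.foldl_append, ih]
    by_cases hc : c = ' ' ∨ c = '\t'
    · have hb : (c == ' ' || c == '\t') = true := by
        rcases hc with h | h <;> simp [h]
      have hnc : ¬ (c ≠ ' ' ∧ c ≠ '\t') := by tauto
      simp [PySem.List.enumerate, hb, hnc]
    · have h1 : ¬ c = ' ' := fun h => hc (Or.inl h)
      have h2 : ¬ c = '\t' := fun h => hc (Or.inr h)
      simp [PySem.List.enumerate, h1, h2]

-- ===== VERDICT (by name: the statement is the Claim_ definition above) =====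
theorem get_lenght_without_end_spaces_or_tabs_spec : Claim_equal_get_lenght_without_end_spaces_or_tabs := by
  intro bash _
  unfold Spec_get_lenght_without_end_spaces_or_tabs get_lenght_without_end_spaces_or_tabs get_lenght_without_end_spaces_or_tabs_alt
  rw [pvLoopA_eq _ _ (le_refl _), List.take_length, pvFoldB_eq]
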